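-- pv_equiv track=rewrite | github.com/daniel-reich/turbo-robot | kiX7WjSFeTmBYcEgK_15.py | major_sum
-- ===== SOURCE A (Python) =====
-- def major_sum(l):
--   y = 0
--   c = 0
--   b = 0
--   for x in l:
--     if x > 0:
--       y += x
--     if x < 0:
--       c += abs(x)
--     if x == 0:
--       b += 1
--   d = max(y, c, b)
--   if d == c:
--     return d * -1
--   return d
-- ===== SOURCE B (Python) =====
-- def major_sum(l):
--   s = sorted(l)
--   n = len(s)
--   i = 0
--   while i < n and s[i] < 0:
--     i += 1
--   j = i
--   while j < n and s[j] == 0: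
--     j += 1
--   c = -sum(s[:i])
--   b = j - i
--   y = sum(s[j:])
--   d = max(y, c, b)
--   return -d if d == c else d
-- ===== Notes on version B (the rewrite author's own statement) =====
-- stated objective: alternative
-- what changed: B sorts the list first, then locates the negative/zero/positive boundaries with two index scans and computes the three aggregates from the prefix, the middle segment's width and the suffix, instead of A's single interleaved three-accumulator loop.
import Mathlib
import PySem

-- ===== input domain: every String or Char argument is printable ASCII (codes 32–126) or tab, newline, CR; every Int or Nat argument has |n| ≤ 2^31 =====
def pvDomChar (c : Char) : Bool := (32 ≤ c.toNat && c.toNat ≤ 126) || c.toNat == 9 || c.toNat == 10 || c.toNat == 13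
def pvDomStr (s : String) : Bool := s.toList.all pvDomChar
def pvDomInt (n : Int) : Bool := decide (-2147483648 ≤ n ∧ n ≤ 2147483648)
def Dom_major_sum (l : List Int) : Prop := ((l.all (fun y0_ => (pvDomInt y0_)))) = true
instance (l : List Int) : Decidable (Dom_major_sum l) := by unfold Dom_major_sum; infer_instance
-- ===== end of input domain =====

-- B sorts the list, finds the negative/zero/positive boundaries by two index scans and
-- computes the three aggregates from prefix sum, segment width and suffix sum; objective: alternative.

-- ===== PORT A =====
-- single pass accumulating (y, c, b)
def major_sum (l : List Int) : Int :=
  let s := l.foldl (fun (acc : Int × Int × Int) x =>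
    let y := if x > 0 then acc.1 + x else acc.1
    let c := if x < 0 then acc.2.1 + |x| else acc.2.1
    let b := if x = 0 then acc.2.2 + 1 else acc.2.2
    (y, c, b)) (0, 0, 0)
  let d := max s.1 (max s.2.1 s.2.2)
  if d = s.2.1 then d * -1 else d

-- ===== PORT B =====
-- while i < n and s[i] < 0: i += 1
def bScanNeg (s : List Int) (i : Nat) : Nat :=
  if h : i < s.length then
    if s[i] < 0 then bScanNeg s (i + 1) else i
  else i
termination_by s.length - i

-- while j < n and s[j] == 0: j += 1
def bScanZero (s : List Int) (j : Nat) : Nat :=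
  if h : j < s.length then
    if s[j] = 0 then bScanZero s (j + 1) else j
  else j
termination_by s.length - j

def major_sum_alt (l : List Int) : Int :=
  let s := PySem.List.sorted l (fun x => x) false
  let i := bScanNeg s 0
  let j := bScanZero s i
  let c := -(PySem.List.slice s none (some (i : Int))).sum
  let b := ((j : Int) - (i : Int))
  let y := (PySem.List.slice s (some (j : Int)) none).sum
  let d := max y (max c b)
  if d = c then -d else d

-- ===== PRECONDITION & SPEC =====
def Spec_major_sum (l : List Int) (out : Int) : Prop := out = major_sum_alt l
instance (l : List Int) (out : Int) : Decidable (Spec_major_sum l out) := by unfold Spec_major_sum; infer_instance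

-- ===== CLAIM (what is proved, stated in full; the proofs are below) =====
def Claim_equal_major_sum : Prop := ∀ (l : List Int), Dom_major_sum l → Spec_major_sum l (major_sum l)

-- ===== LEMMAS AND PROOFS =====

theorem major_sum_fold_eq (l : List Int) (y c b : Int) :
    l.foldl (fun (acc : Int × Int × Int) x =>
      let y := if x > 0 then acc.1 + x else acc.1
      let c := if x < 0 then acc.2.1 + |x| else acc.2.1
      let b := if x = 0 then acc.2.2 + 1 else acc.2.2
      (y, c, b)) (y, c, b)
    = (y + ((l.filter (fun x => decide (0 < x))).sum : Int),
       c - ((l.filter (fun x => decide (x < 0))).sum : Int),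
       b + ((l.filter (fun x => decide (x = 0))).length : Int)) := by
  induction l generalizing y c b with
  | nil => simp
  | cons a t ih =>
    simp only [List.foldl_cons, List.filter_cons]
    rw [ih]
    rcases lt_trichotomy a 0 with h | h | h
    · have h1 : ¬ 0 < a := by omega
      have h3 : ¬ a = 0 := by omega
      simp only [h, h1, h3, if_true, if_false, decide_true, decide_false, gt_iff_lt]
      simp [abs_of_neg h]
      ring
    · subst h
      simp
      omega
    · have h2 : ¬ a < 0 := by omega
      have h3 : ¬ a = 0 := by omega
      simp only [h, h2, h3, decide_true, decide_false, gt_iff_lt, if_true, if_false]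
      simp
      ring

theorem bScanNeg_eq (n : Nat) (s : List Int) (i : Nat) (hn : s.length - i ≤ n) :
    bScanNeg s i = i + ((s.drop i).takeWhile (fun x => decide (x < 0))).length := by
  induction n generalizing i with
  | zero =>
    have h : ¬ i < s.length := by omega
    unfold bScanNeg
    simp [h, List.drop_eq_nil_of_le (by omega : s.length ≤ i)]
  | succ n ih =>
    unfold bScanNeg
    by_cases h : i < s.length
    · rw [List.drop_eq_getElem_cons h, List.takeWhile_cons]
      by_cases hx : s[i] < 0
      · simp only [h, hx, dif_pos, if_pos, decide_true]
        rw [ih (i + 1) (by omega)]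
        simp; omega
      · simp [h, hx]
    · simp [h, List.drop_eq_nil_of_le (by omega : s.length ≤ i)]

theorem bScanZero_eq (n : Nat) (s : List Int) (i : Nat) (hn : s.length - i ≤ n) :
    bScanZero s i = i + ((s.drop i).takeWhile (fun x => decide (x = 0))).length := by
  induction n generalizing i with
  | zero =>
    have h : ¬ i < s.length := by omega
    unfold bScanZero
    simp [h, List.drop_eq_nil_of_le (by omega : s.length ≤ i)]
  | succ n ih =>
    unfold bScanZero
    by_cases h : i < s.length
    · rw [List.drop_eq_getElem_cons h, List.takeWhile_cons]
      by_cases hx : s[i] = 0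
      · simp only [h, hx, dif_pos, if_pos, decide_true]
        rw [ih (i + 1) (by omega)]
        simp; omega
      · simp [h, hx]
    · simp [h, List.drop_eq_nil_of_le (by omega : s.length ≤ i)]

-- on a sorted list, the negative elements form exactly the longest negative prefix
theorem takeWhile_neg_eq_filter (s : List Int) (hs : s.Pairwise (· ≤ ·)) :
    s.takeWhile (fun x => decide (x < 0)) = s.filter (fun x => decide (x < 0)) := by
  induction s with
  | nil => rfl
  | cons a t ih =>
    rcases List.pairwise_cons.mp hs with ⟨ha, ht⟩
    by_cases h : a < 0
    · simp only [List.takeWhile_cons, List.filter_cons, h, decide_true, if_pos, ih ht]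
    · have : t.filter (fun x => decide (x < 0)) = [] :=
        List.filter_eq_nil_iff.mpr (fun b hb => by
          have := ha b hb; simp; omega)
      simp [List.takeWhile_cons, List.filter_cons, h, this]

theorem takeWhile_zero_eq_filter (t : List Int) (h0 : ∀ b ∈ t, 0 ≤ b)
    (ht : t.Pairwise (· ≤ ·)) :
    t.takeWhile (fun x => decide (x = 0)) = t.filter (fun x => decide (x = 0)) := by
  induction t with
  | nil => rfl
  | cons a t ih =>
    rcases List.pairwise_cons.mp ht with ⟨ha, ht'⟩
    by_cases h : a = 0
    · simp only [List.takeWhile_cons, List.filter_cons, h, decide_true, if_pos]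
      rw [ih (fun b hb => h0 b (List.mem_cons_of_mem _ hb)) ht']
    · have hpos : 0 < a := lt_of_le_of_ne (h0 a (List.mem_cons_self)) (Ne.symm h)
      have : t.filter (fun x => decide (x = 0)) = [] :=
        List.filter_eq_nil_iff.mpr (fun b hb => by
          have := ha b hb; simp; omega)
      simp [List.takeWhile_cons, List.filter_cons, h, this]

theorem dropWhile_zero_eq_filter (t : List Int) (h0 : ∀ b ∈ t, 0 ≤ b)
    (ht : t.Pairwise (· ≤ ·)) :
    t.dropWhile (fun x => decide (x = 0)) = t.filter (fun x => decide (0 < x)) := by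
  induction t with
  | nil => rfl
  | cons a t ih
  =>
    rcases List.pairwise_cons.mp ht with ⟨ha, ht'⟩
    by_cases h : a = 0
    · subst h
      simp [List.dropWhile_cons, List.filter_cons,
        ih (fun b hb => h0 b (List.mem_cons_of_mem _ hb)) ht']
    · have hpos : 0 < a := lt_of_le_of_ne (h0 a (List.mem_cons_self)) (Ne.symm h)
      have hall : t.filter (fun x => decide (0 < x)) = t :=
        List.filter_eq_self.mpr (fun b hb => by
          have := ha b hb; simp; omega)
      simp [List.dropWhile_cons, List.filter_cons, h, hpos, hall]

theorem dropWhile_neg_props (s : List Int) (hs : s.Pairwise (· ≤ ·)) :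
    (∀ b ∈ s.dropWhile (fun x => decide (x < 0)), 0 ≤ b) ∧
    (s.dropWhile (fun x => decide (x < 0))).Pairwise (· ≤ ·) := by
  induction s with
  | nil => simp
  | cons a t ih =>
    rcases List.pairwise_cons.mp hs with ⟨ha, ht⟩
    by_cases h : a < 0
    · simpa [List.dropWhile_cons, h] using ih ht
    · refine ⟨?_, by simpa [List.dropWhile_cons, h] using hs⟩
      intro b hb
      simp only [List.dropWhile_cons, h, decide_false] at hb
      simp at hb
      rcases hb with rfl | hb
      · omega
      · have := ha b hb; omega

theorem drop_takeWhile_length {α : Type} (p : α → Bool) (l : List α) :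
    l.drop (l.takeWhile p).length = l.dropWhile p := by
  have h := List.takeWhile_append_dropWhile (p := p) (l := l)
  calc l.drop (l.takeWhile p).length
      = (l.takeWhile p ++ l.dropWhile p).drop (l.takeWhile p).length := by rw [h]
    _ = l.dropWhile p := by rw [List.drop_left]

-- ===== VERDICT (by name: the statement is the Claim_ definition above) =====
theorem major_sum_spec : Claim_equal_major_sum := by
  intro l _
  show major_sum l = major_sum_alt l
  unfold major_sum major_sum_alt
  rw [major_sum_fold_eq]
  simp only [zero_add, zero_sub]
  set s := PySem.List.sorted l (fun x => x) false with hsdef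
  have hperm : s.Perm l := PySem.List.sorted_perm l (fun x => x) false
  have hs : s.Pairwise (· ≤ ·) := by
    simpa using PySem.List.sorted_pairwise l (fun x => x)
  -- translate the scan indices
  have hi : bScanNeg s 0 = (s.takeWhile (fun x => decide (x < 0))).length := by
    rw [bScanNeg_eq s.length s 0 (by omega)]; simp
  set i := bScanNeg s 0 with hidef
  have hdropi : s.drop i = s.dropWhile (fun x => decide (x < 0)) := by
    rw [hi, drop_takeWhile_length]
  have hj : bScanZero s i
      = i + ((s.dropWhile (fun x => decide (x < 0))).takeWhile (fun x => decide (x = 0))).length := by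
    rw [bScanZero_eq s.length s i (by omega), hdropi]
  obtain ⟨hd0, hdsorted⟩ := dropWhile_neg_props s hs
  -- the three aggregates over the sorted list
  have hslice_i : PySem.List.slice s none (some (i : Int)) = s.filter (fun x => decide (x < 0)) := by
    rw [PySem.List.slice_to_natCast, hi, ← takeWhile_neg_eq_filter s hs]
    exact (List.prefix_iff_eq_take.mp (List.takeWhile_prefix _)).symm
  have hwidth : ((bScanZero s i : Int) - (i : Int)) = ((s.filter (fun x => decide (x = 0))).length : Int) := by
    rw [hj]
    have := takeWhile_zero_eq_filter _ hd0 hdsorted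
    rw [this]
    have hfperm : ((s.dropWhile (fun x => decide (x < 0))).filter (fun x => decide (x = 0)))
        = s.filter (fun x => decide (x = 0)) := by
      conv_rhs => rw [← List.takeWhile_append_dropWhile (p := fun x => decide (x < 0)) (l := s)]
      rw [List.filter_append]
      have : (s.takeWhile (fun x => decide (x < 0))).filter (fun x => decide (x = 0)) = [] :=
        List.filter_eq_nil_iff.mpr (fun b hb => by
          have := List.mem_takeWhile_imp hb; simp_all; omega)
      simp [this]
    rw [hfperm]; push_cast; ring
  have hslice_j : PySem.List.slice s (some ((bScanZero s i : Nat) : Int)) none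
      = s.filter (fun x => decide (0 < x)) := by
    rw [PySem.List.slice_from_natCast, hj, ← List.drop_drop, hdropi,
        drop_takeWhile_length, dropWhile_zero_eq_filter _ hd0 hdsorted]
    conv_rhs => rw [← List.takeWhile_append_dropWhile (p := fun x => decide (x < 0)) (l := s)]
    rw [List.filter_append]
    have : (s.takeWhile (fun x => decide (x < 0))).filter (fun x => decide (0 < x)) = [] :=
      List.filter_eq_nil_iff.mpr (fun b hb => by
        have := List.mem_takeWhile_imp hb; simp_all; omega)
    simp [this]
  -- transport the filters from s to l along the permutation
  have hy : ((s.filter (fun x => decide (0 < x))).sum : Int) = ((l.filter (fun x => decide (0 < x))).sum : Int) :=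
    List.Perm.sum_eq (hperm.filter _)
  have hc : ((s.filter (fun x => decide (x < 0))).sum : Int) = ((l.filter (fun x => decide (x < 0))).sum : Int) :=
    List.Perm.sum_eq (hperm.filter _)
  have hb : ((s.filter (fun x => decide (x = 0))).length) = ((l.filter (fun x => decide (x = 0))).length) :=
    List.Perm.length_eq (hperm.filter _)
  simp only [hslice_i, hwidth, hslice_j, hy, hc, hb]
  split_ifs with h <;> [ring; rfl]
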